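-- pv_equiv track=rewrite | github.com/k0rval4n/Respaldo-k0rval4n-IIC2233 | Tareas/T2/entrega_intermedia/utilidades_cliente.py | riesgo_derecha
-- ===== SOURCE A (Python) =====
-- def riesgo_derecha(coords: tuple, tablero: list):
--     fil_i = coords[0]
--     col_i = coords[1]
--     choco = False
--     for col in range(col_i + 1, len(tablero[fil_i])):
--         if tablero[fil_i][col] == "P":
--             choco = True
--         if not choco and tablero[fil_i][col] == "C":
--             return True
--     return False
-- ===== SOURCE B (Python) =====
-- def riesgo_derecha(coords: tuple, tablero: list):
--     fil_i, col_i = coords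
--     sub = tablero[fil_i][col_i + 1:]
--     pos_c = sub.index("C") if "C" in sub else len(sub)
--     pos_p = sub.index("P") if "P" in sub else len(sub)
--     return pos_c < pos_p
-- ===== Notes on version B (the rewrite author's own statement) =====
-- stated objective: simpler
-- what changed: A's flag-guarded early-exit scan over column indices is replaced by slicing the subrow after col_i and comparing the first index of 'C' with the first index of 'P' (length sentinels when absent).
-- outside the precondition, e.g. on riesgo_derecha((0, -2), [['C', 'x']]): A returns True, B returns False
import Mathlib
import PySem

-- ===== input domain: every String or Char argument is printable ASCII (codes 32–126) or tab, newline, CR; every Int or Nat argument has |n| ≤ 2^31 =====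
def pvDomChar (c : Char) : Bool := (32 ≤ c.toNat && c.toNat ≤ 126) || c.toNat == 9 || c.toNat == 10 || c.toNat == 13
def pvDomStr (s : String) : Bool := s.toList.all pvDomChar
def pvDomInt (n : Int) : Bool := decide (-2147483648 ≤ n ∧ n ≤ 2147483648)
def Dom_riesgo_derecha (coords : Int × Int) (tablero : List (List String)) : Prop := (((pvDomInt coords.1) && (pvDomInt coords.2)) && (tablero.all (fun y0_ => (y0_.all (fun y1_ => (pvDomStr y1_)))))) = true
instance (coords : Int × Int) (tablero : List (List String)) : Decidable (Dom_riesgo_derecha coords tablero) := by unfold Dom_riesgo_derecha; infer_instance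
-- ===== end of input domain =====

-- B replaces A's flag-guarded early-exit index scan by locating the first 'C' and first 'P' in the
-- subrow after col_i and comparing their positions (objective: simpler).

-- ===== PORT A =====
-- the for-loop of A: iterates over column indices, with the 'choco' flag and early return True
def riesgoLoopA (row : List String) (cols : List Int) (choco : Bool) : Bool :=
  match cols with
  | [] => false
  | col :: rest =>
    let choco := if PySem.List.pyGetD row col "" = "P" then true else choco
    if choco = false ∧ PySem.List.pyGetD row col "" = "C" then true
    else riesgoLoopA row rest choco

def riesgo_derecha (coords : Int × Int) (tablero : List (List String)) : Bool :=
  let fil_i := coords.1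
  let col_i := coords.2
  let row := PySem.List.pyGetD tablero fil_i []
  riesgoLoopA row (PySem.List.pyRange (col_i + 1) (row.length : Int) 1) false

-- ===== PORT B =====
def riesgo_derecha_alt (coords : Int × Int) (tablero : List (List String)) : Bool :=
  let row := PySem.List.pyGetD tablero coords.1 []
  let sub := PySem.List.slice row (some (coords.2 + 1)) none
  let pos_c := match PySem.List.index? sub "C" with | some i => i | none => sub.length
  let pos_p := match PySem.List.index? sub "P" with | some i => i | none => sub.length
  decide (pos_c < pos_p)

-- ===== PRECONDITION & SPEC =====
-- Pre_ excludes fil_i outside Python's index range (A raises IndexError there) and col_i ≤ -2,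
-- where A's range start is negative and A re-reads cells through Python's negative-index
-- wraparound (or raises IndexError) — an accident of A's implementation.
def Pre_riesgo_derecha (coords : Int × Int) (tablero : List (List String)) : Prop :=
  PySem.Raise.InRange tablero.length coords.1 ∧ -1 ≤ coords.2
instance (coords : Int × Int) (tablero : List (List String)) : Decidable (Pre_riesgo_derecha coords tablero) := by unfold Pre_riesgo_derecha; infer_instance

def pvWitness_riesgo_derecha : (Int × Int) × List (List String) := ((0, 0), [["x", "C", "P"]])

def Spec_riesgo_derecha (coords : Int × Int) (tablero : List (List String)) (out : Bool) : Prop := out = riesgo_derecha_alt coords tablero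
instance (coords : Int × Int) (tablero : List (List String)) (out : Bool) : Decidable (Spec_riesgo_derecha coords tablero out) := by unfold Spec_riesgo_derecha; infer_instance

-- ===== CLAIM (what is proved, stated in full; the proofs are below) =====
def Claim_equal_riesgo_derecha : Prop := ∀ (coords : Int × Int) (tablero : List (List String)), Dom_riesgo_derecha coords tablero → Pre_riesgo_derecha coords tablero → Spec_riesgo_derecha coords tablero (riesgo_derecha coords tablero)

-- ===== LEMMAS AND PROOFS =====

-- the common meaning: first 'C' strictly before any 'P' in the subrow
def goCP : List String → Bool
  | [] => false
  | x :: xs => if x = "P" then false else if x = "C" then true else goCP xs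

lemma riesgoLoopA_true (row : List String) (cols : List Int) :
    riesgoLoopA row cols true = false := by
  induction cols with
  | nil => rfl
  | cons c rest ih => simp [riesgoLoopA, ih]

lemma alt_core_eq_goCP (l : List String) :
    (decide ((match PySem.List.index? l "C" with | some i => i | none => l.length)
           < (match PySem.List.index? l "P" with | some i => i | none => l.length))) = goCP l := by
  induction l with
  | nil => simp [PySem.List.index?, goCP]
  | cons x xs ih =>
    by_cases hp : x = "P"
    · subst hp
      rw [PySem.List.index?_cons_self]
      simp [goCP]
    · by_cases hc : x = "C"
      · subst hc
        rw [PySem.List.index?_cons_self, PySem.List.index?_cons_of_ne xs hp]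
        cases h : PySem.List.index? xs "P" <;> simp [goCP]
      · rw [PySem.List.index?_cons_of_ne xs hc, PySem.List.index?_cons_of_ne xs hp]
        cases h1 : PySem.List.index? xs "C" <;> cases h2 : PySem.List.index? xs "P" <;>
          simp only [h1, h2] at ih <;>
          simp [goCP, hp, hc, ← ih]

lemma loopA_eq_goCP (row : List String) (k : Nat) :
    riesgoLoopA row (PySem.List.pyRange (k : Int) (row.length : Int) 1) false = goCP (row.drop k) := by
  induction hd : row.length - k generalizing k with
  | zero =>
    have hk : row.length ≤ k := by omega
    rw [PySem.List.pyRange_one_eq_nil (by exact_mod_cast hk)]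
    rw [List.drop_eq_nil_of_le hk]
    rfl
  | succ d ih =>
    have hk : k < row.length := by omega
    rw [PySem.List.pyRange_one_cons (by exact_mod_cast hk)]
    have hget : PySem.List.pyGetD row (k : Int) "" = row[k] := by
      rw [PySem.List.pyGetD_natCast]; exact List.getD_eq_getElem _ _ hk
    have hdrop : row.drop k = row[k] :: row.drop (k + 1) := List.drop_eq_getElem_cons hk
    have hcast : (k : Int) + 1 = ((k + 1 : Nat) : Int) := by push_cast; ring
    by_cases hp : row[k] = "P"
    · simp only [riesgoLoopA, hget, hp]
      rw [hdrop]
      simp [goCP, hp, riesgoLoopA_true]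
    · by_cases hc : row[k] = "C"
      · simp only [riesgoLoopA, hget, hp]
        rw [hdrop]
        simp [goCP, hc]
      · rw [hdrop]
        simp only [goCP, if_neg hp, if_neg hc]
        simp only [riesgoLoopA, hget, if_neg hp]
        rw [if_neg (by simp [hc])]
        rw [hcast, ih (k + 1) (by omega)]

theorem riesgo_derecha_spec_aux (coords : Int × Int) (tablero : List (List String))
    (hpre : Pre_riesgo_derecha coords tablero) :
    riesgo_derecha coords tablero = riesgo_derecha_alt coords tablero := by
  obtain ⟨hrow, hcol⟩ := hpre
  have hk : coords.2 + 1 = (((coords.2 + 1).toNat : Nat) : Int) := by omega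
  have hslice : PySem.List.slice (PySem.List.pyGetD tablero coords.1 []) (some (coords.2 + 1)) none
      = (PySem.List.pyGetD tablero coords.1 []).drop (coords.2 + 1).toNat := by
    rw [hk]; exact PySem.List.slice_from_natCast _ _
  have hB : riesgo_derecha_alt coords tablero
      = goCP ((PySem.List.pyGetD tablero coords.1 []).drop (coords.2 + 1).toNat) := by
    unfold riesgo_derecha_alt
    simp only [hslice]
    exact alt_core_eq_goCP _
  have hA : riesgo_derecha coords tablero
      = goCP ((PySem.List.pyGetD tablero coords.1 []).drop (coords.2 + 1).toNat) := by
    show riesgoLoopA (PySem.List.pyGetD tablero coords.1 [])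
        (PySem.List.pyRange (coords.2 + 1) (((PySem.List.pyGetD tablero coords.1 []).length : Nat) : Int) 1)
        false = _
    conv_lhs => rw [hk]
    exact loopA_eq_goCP _ _
  rw [hA, hB]

-- ===== VERDICT (by name: the statement is the Claim_ definition above) =====
theorem riesgo_derecha_spec : Claim_equal_riesgo_derecha := by
  intro coords tablero _ hpre
  exact riesgo_derecha_spec_aux coords tablero hpre
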